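-- pv_equiv track=rewrite | github.com/boaznahum/cubesolve | src/cube/domain/solver/_2x2/ida_star_tables.py | perm_from_cp
-- ===== SOURCE A (Python) =====
-- def perm_from_cp(cp: list[int]) -> int:
--     """Compute permutation coordinate (Lehmer code) from corners 0–6.
--
--     Corner 7 (DBL) is fixed, so we encode a permutation of 7 elements.
--     """
--     val: int = 0
--     for i in range(7):
--         count: int = 0
--         for j in range(i + 1, 7):
--             if cp[j] < cp[i]:
--                 count += 1
--         val = val * (7 - i) + count
--     return val
-- ===== SOURCE B (Python) =====
-- def perm_from_cp(cp: list[int]) -> int: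
--     """Lehmer-code rank via a shrinking sorted pool instead of a nested inversion scan."""
--     available = sorted(cp[i] for i in range(7))
--     val = 0
--     for i in range(7):
--         x = cp[i]
--         idx = available.index(x)
--         val = val * len(available) + idx
--         available.remove(x)
--     return val
-- ===== Notes on version B (the rewrite author's own statement) =====
-- stated objective: alternative
-- what changed: Replaces the nested strictly-smaller scan with a sorted pool of the seven values: each step reads the rank as available.index(cp[i]) and removes the value, so no inner inversion loop remains.
import Mathlib
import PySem

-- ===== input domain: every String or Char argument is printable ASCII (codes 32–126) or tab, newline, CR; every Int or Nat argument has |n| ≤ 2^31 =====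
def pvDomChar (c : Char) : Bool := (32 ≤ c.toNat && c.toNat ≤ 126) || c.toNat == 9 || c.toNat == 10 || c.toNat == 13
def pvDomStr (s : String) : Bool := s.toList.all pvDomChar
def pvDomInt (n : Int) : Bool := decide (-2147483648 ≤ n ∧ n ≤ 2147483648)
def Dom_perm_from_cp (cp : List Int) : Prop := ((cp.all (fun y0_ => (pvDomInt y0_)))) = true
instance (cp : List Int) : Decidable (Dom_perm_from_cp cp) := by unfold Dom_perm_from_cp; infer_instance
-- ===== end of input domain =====

-- B replaces A's nested inversion scan with a sorted pool of the seven values,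
-- reading each digit as index-in-pool and removing the value (alternative algorithm, similar cost).

-- ===== PORT A =====
def perm_from_cp (cp : List Int) : Int :=
  (PySem.List.pyRange 0 7 1).foldl
    (fun val i =>
      let count : Int :=
        (PySem.List.pyRange (i + 1) 7 1).foldl
          (fun c j => if PySem.List.pyGetD cp j 0 < PySem.List.pyGetD cp i 0 then c + 1 else c) 0
      val * (7 - i) + count)
    0

-- ===== PORT B =====
def perm_from_cp_alt (cp : List Int) : Int :=
  let available : List Int :=
    PySem.List.sorted ((PySem.List.pyRange 0 7 1).map (fun i => PySem.List.pyGetD cp i 0))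
      (fun x => x) false
  ((PySem.List.pyRange 0 7 1).foldl
    (fun (st : Int × List Int) i =>
      let x := PySem.List.pyGetD cp i 0
      let idx : Int := ((PySem.List.index? st.2 x).getD 0 : Nat)
      (st.1 * (st.2.length : Int) + idx, (PySem.List.remove? st.2 x).getD st.2))
    (0, available)).1

-- ===== PRECONDITION & SPEC =====
-- Pre_ excludes exactly the inputs on which the Python A raises IndexError (fewer than 7 entries).
def Pre_perm_from_cp (cp : List Int) : Prop := 7 ≤ cp.length
instance (cp : List Int) : Decidable (Pre_perm_from_cp cp) := by unfold Pre_perm_from_cp; infer_instance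
def pvWitness_perm_from_cp : List Int := [3, 0, 2, 6, 1, 5, 4]

def Spec_perm_from_cp (cp : List Int) (out : Int) : Prop := out = perm_from_cp_alt cp
instance (cp : List Int) (out : Int) : Decidable (Spec_perm_from_cp cp out) := by unfold Spec_perm_from_cp; infer_instance

-- ===== CLAIM (what is proved, stated in full; the proofs are below) =====
def Claim_equal_perm_from_cp : Prop := ∀ (cp : List Int), Dom_perm_from_cp cp → Pre_perm_from_cp cp → Spec_perm_from_cp cp (perm_from_cp cp)

-- ===== LEMMAS AND PROOFS =====

-- A's inner count, as a fold over the remaining values.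
def cntLt (x : Int) (ys : List Int) : Int :=
  ys.foldl (fun c y => if y < x then c + 1 else c) 0

-- Common reference recursion: Lehmer rank over the list of the 7 relevant values.
def rankRec : List Int → Int → Int
  | [], val => val
  | x :: rest, val => rankRec rest (val * ((x :: rest).length : Int) + cntLt x rest)

theorem foldl_cnt_acc (x : Int) (ys : List Int) :
    ∀ c : Int, ys.foldl (fun c y => if y < x then c + 1 else c) c
      = c + (ys.countP (fun y => decide (y < x)) : Int) := by
  induction ys with
  | nil => intro c; simp
  | cons a t ih =>
      intro c
      by_cases h : a < x
      · simp [List.foldl, h, ih]; ring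
      · simp [List.foldl, h, ih]

theorem cntLt_eq_countP (x : Int) (ys : List Int) :
    cntLt x ys = (ys.countP (fun y => decide (y < x)) : Int) := by
  simpa using foldl_cnt_acc x ys 0

theorem index_sorted_eq_countP (avail : List Int) (x : Int)
    (hs : avail.Pairwise (· ≤ ·)) (hx : x ∈ avail) :
    PySem.List.index? avail x = some (avail.countP (fun y => decide (y < x))) := by
  induction avail with
  | nil => cases hx
  | cons a t ih =>
      rcases List.pairwise_cons.mp hs with ⟨hle, ht⟩
      by_cases hax : a = x
      · subst hax
        have h0 : t.countP (fun y => decide (y < a)) = 0 := by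
          apply List.countP_eq_zero.mpr
          intro y hy
          simp only [decide_eq_true_eq]
          exact not_lt.mpr (hle y hy)
        rw [PySem.List.index?_cons_self]
        simp [h0]
      · have hxt : x ∈ t := by
          rcases List.mem_cons.mp hx with h | h
          · exact absurd h.symm hax
          · exact h
        have halt : a < x := lt_of_le_of_ne (hle x hxt) hax
        rw [PySem.List.index?_cons_of_ne t hax, ih ht hxt]
        simp [halt]

theorem B_loop (xs : List Int) : ∀ (avail : List Int) (val : Int),
    avail.Pairwise (· ≤ ·) → avail.Perm xs →
    (xs.foldl
      (fun (st : Int × List Int) x =>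
        (st.1 * (st.2.length : Int) + (((PySem.List.index? st.2 x).getD 0 : Nat) : Int),
         (PySem.List.remove? st.2 x).getD st.2))
      (val, avail)).1 = rankRec xs val := by
  induction xs with
  | nil => intro avail val _ _; simp [rankRec]
  | cons x rest ih =>
      intro avail val hs hp
      have hx : x ∈ avail := hp.mem_iff.mpr (List.mem_cons_self ..)
      have hidx := index_sorted_eq_countP avail x hs hx
      have hrem := PySem.List.remove?_eq_some_erase avail x hx
      have hcnt : avail.countP (fun y => decide (y < x))
          = rest.countP (fun y => decide (y < x)) := by
        rw [hp.countP_eq]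
        simp
      have hlen : avail.length = (x :: rest).length := hp.length_eq
      have hs' : (avail.erase x).Pairwise (· ≤ ·) :=
        hs.sublist List.erase_sublist
      have hp' : (avail.erase x).Perm rest := by
        simpa [List.erase_cons_head] using hp.erase x
      simp only [List.foldl_cons, hidx, hrem, Option.getD_some]
      rw [ih (avail.erase x) _ hs' hp']
      simp [rankRec, hcnt, hlen, cntLt_eq_countP]

theorem range7 : PySem.List.pyRange 0 7 1 = [0, 1, 2, 3, 4, 5, 6] := by decide

-- A's port equals rankRec on the 7 accessed values.
theorem A_eq_rankRec (cp : List Int) :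
    perm_from_cp cp = rankRec ([0, 1, 2, 3, 4, 5, 6].map (fun i => PySem.List.pyGetD cp i 0)) 0 := by
  have r1 : PySem.List.pyRange 1 7 1 = [1, 2, 3, 4, 5, 6] := by decide
  have r2 : PySem.List.pyRange 2 7 1 = [2, 3, 4, 5, 6] := by decide
  have r3 : PySem.List.pyRange 3 7 1 = [3, 4, 5, 6] := by decide
  have r4 : PySem.List.pyRange 4 7 1 = [4, 5, 6] := by decide
  have r5 : PySem.List.pyRange 5 7 1 = [5, 6] := by decide
  have r6 : PySem.List.pyRange 6 7 1 = [6] := by decide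
  have r7 : PySem.List.pyRange 7 7 1 = [] := by decide
  unfold perm_from_cp
  rw [range7]
  simp only [List.foldl_cons, List.foldl_nil, List.map]
  norm_num [r1, r2, r3, r4, r5, r6, r7, rankRec, cntLt, List.foldl_cons, List.foldl_nil]

-- B's port equals rankRec on the same 7 values.
theorem B_eq_rankRec (cp : List Int) :
    perm_from_cp_alt cp = rankRec ([0, 1, 2, 3, 4, 5, 6].map (fun i => PySem.List.pyGetD cp i 0)) 0 := by
  unfold perm_from_cp_alt
  rw [range7]
  have hs : (PySem.List.sorted ([0,1,2,3,4,5,6].map (fun i => PySem.List.pyGetD cp i 0)) (fun x => x) false).Pairwise (· ≤ ·) := by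
    simpa using PySem.List.sorted_pairwise ([0,1,2,3,4,5,6].map (fun i => PySem.List.pyGetD cp i 0)) (fun x => x)
  have hp := PySem.List.sorted_perm ([0,1,2,3,4,5,6].map (fun i => PySem.List.pyGetD cp i 0)) (fun x => x) false
  have := B_loop ([0,1,2,3,4,5,6].map (fun i => PySem.List.pyGetD cp i 0)) _ 0 hs hp
  simp only [List.map] at this ⊢
  simp only [List.foldl_cons, List.foldl_nil] at this ⊢
  exact this

-- ===== VERDICT (by name: the statement is the Claim_ definition above) =====
theorem perm_from_cp_spec : Claim_equal_perm_from_cp := by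
  intro cp _ _
  unfold Spec_perm_from_cp
  rw [A_eq_rankRec, B_eq_rankRec]
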